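-- pv_equiv track=rewrite | github.com/ishtiq10001/LABS | lab7.py | longest_seq
-- ===== SOURCE A (Python) =====
-- def longest_seq(t_1):
--     val = 0
--     for i in range(len(t_1)):
--         for j in range(i,len(t_1)):
--             if t_1[i]<t_1[j]:
--                 break
--             elif t_1[i]>t_1[j]:
--                 val = t_1[i]
--                 if j < len(t_1)-1:
--                     continue
--                 else:
--                     return (i)
--             elif t_1[i] == t_1[j]:
--                 val = t_1[i]
--                 if j < len(t_1)-1:
--                     continue
--                 else:
--                     return (i)
-- ===== SOURCE B (Python) =====
-- def longest_seq(t_1):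
--     # The first index whose value is >= every later value is exactly
--     # the first occurrence of the maximum: one max pass + one index pass.
--     if not t_1:
--         return None
--     return t_1.index(max(t_1))
-- ===== Notes on version B (the rewrite author's own statement) =====
-- stated objective: faster
-- what changed: Replaces the quadratic nested scan with 'first occurrence of the maximum' (max + index, two linear passes), which provably picks the same index.
import Mathlib
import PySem

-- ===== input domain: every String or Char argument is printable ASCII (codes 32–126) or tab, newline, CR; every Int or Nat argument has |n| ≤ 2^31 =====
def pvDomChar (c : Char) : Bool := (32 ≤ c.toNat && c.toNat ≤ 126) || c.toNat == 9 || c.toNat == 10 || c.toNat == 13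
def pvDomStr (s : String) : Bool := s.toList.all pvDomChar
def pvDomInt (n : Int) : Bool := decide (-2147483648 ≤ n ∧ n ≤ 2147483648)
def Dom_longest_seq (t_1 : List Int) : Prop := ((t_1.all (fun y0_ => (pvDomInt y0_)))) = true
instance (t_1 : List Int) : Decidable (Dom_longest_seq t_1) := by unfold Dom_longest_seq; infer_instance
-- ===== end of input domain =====

-- B replaces A's quadratic nested scan by 'first occurrence of the maximum' (max + index): faster.

-- ===== PORT A =====
-- inner loop 'for j in range(i, len(t_1))'; returns true iff the loop hits 'return (i)'
-- (the variable 'val' of A is written but never read, so it carries no state).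
def pvInnerA (t : List Int) (i : Nat) : List Nat → Bool
  | [] => false
  | j :: rest =>
    if t.getD i 0 < t.getD j 0 then false          -- break
    else if t.getD j 0 < t.getD i 0 then           -- elif t_1[i] > t_1[j]
      (if j < t.length - 1 then pvInnerA t i rest else true)
    else                                           -- elif t_1[i] == t_1[j]
      (if j < t.length - 1 then pvInnerA t i rest else true)

-- outer loop 'for i in range(len(t_1))'; falling off the end returns None
def pvOuterA (t : List Int) : List Nat → Option Int
  | [] => none
  | i :: rest =>
    if pvInnerA t i (List.range' i (t.length - i)) then some (i : Int)
    else pvOuterA t rest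

def longest_seq (t_1 : List Int) : Option Int :=
  pvOuterA t_1 (List.range t_1.length)

-- ===== PORT B =====
-- Source B: if not t_1: return None; return t_1.index(max(t_1))
def longest_seq_alt (t_1 : List Int) : Option Int :=
  match t_1 with
  | [] => none
  | _ =>
    (PySem.List.max? t_1 (fun x => x)).bind fun m =>
      (PySem.List.index? t_1 m).map (fun k => (k : Int))

-- ===== PRECONDITION & SPEC =====
def Spec_longest_seq (t_1 : List Int) (out : Option Int) : Prop := out = longest_seq_alt t_1
instance (t_1 : List Int) (out : Option Int) : Decidable (Spec_longest_seq t_1 out) := by unfold Spec_longest_seq; infer_instance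

-- ===== CLAIM (what is proved, stated in full; the proofs are below) =====
def Claim_equal_longest_seq : Prop := ∀ (t_1 : List Int), Dom_longest_seq t_1 → Spec_longest_seq t_1 (longest_seq t_1)

-- ===== LEMMAS AND PROOFS =====

-- The inner loop returns true iff t[i] dominates every t[k] for i ≤ j ≤ k < n.
theorem pvInnerA_spec_aux (t : List Int) (i : Nat) :
    ∀ (d j : Nat), j < t.length → t.length - j = d + 1 →
      (pvInnerA t i (List.range' j (t.length - j)) = true ↔
        ∀ k, j ≤ k → k < t.length → t.getD k 0 ≤ t.getD i 0) := by
  intro d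
  induction d with
  | zero =>
    intro j hj hd
    have hj1 : j = t.length - 1 := by omega
    rw [hd, List.range'_one]
    by_cases hlt : t.getD i 0 < t.getD j 0
    · simp only [pvInnerA, if_pos hlt]
      constructor
      · intro h; exact absurd h (by simp)
      · intro h; exact absurd (h j le_rfl hj) (by exact absurd (h j le_rfl hj) (not_le.2 hlt))
    · have hnot : ¬ j < t.length - 1 := by omega
      simp only [pvInnerA, if_neg hlt, if_neg hnot, ite_self]
      constructor
      · intro _ k hk1 hk2
        have : k = j := by omega
        subst this
        exact not_lt.1 hlt
      · intro _; trivial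
  | succ d ih =>
    intro j hj hd
    have hj1 : j < t.length - 1 := by omega
    have hrw : t.length - j = (t.length - (j + 1)) + 1 := by omega
    have hrest : t.length - (j + 1) = d + 1 := by omega
    rw [hrw, List.range'_succ]
    by_cases hlt : t.getD i 0 < t.getD j 0
    · simp only [pvInnerA, if_pos hlt]
      constructor
      · intro h; exact absurd h (by simp)
      · intro h; exact absurd (h j le_rfl hj) (not_le.2 hlt)
    · simp only [pvInnerA, if_neg hlt, if_pos hj1, ite_self]
      rw [show List.range' (j + 1) (t.length - (j + 1)) = List.range' (j + 1) (t.length - (j + 1)) from rfl] at *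
      have hih := ih (j + 1) (by omega) hrest
      rw [hih]
      constructor
      · intro h k hk1 hk2
        rcases Nat.eq_or_lt_of_le hk1 with heq | hlt2
        · subst heq; exact not_lt.1 hlt
        · exact h k hlt2 hk2
      · intro h k hk1 hk2
        exact h k (by omega) hk2

theorem pvOuterA_find (t : List Int) :
    ∀ l : List Nat, pvOuterA t l =
      (l.find? (fun i => pvInnerA t i (List.range' i (t.length - i)))).map (fun i => (i : Int)) := by
  intro l
  induction l with
  | nil => rfl
  | cons a l ih =>
    simp only [pvOuterA, List.find?_cons]
    by_cases h : pvInnerA t a (List.range' a (t.length - a)) = true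
    · simp [h]
    · simp only [Bool.not_eq_true] at h
      simp [h, ih]

theorem find?_range'_eq {p : Nat → Bool} :
    ∀ (b a k : Nat), a ≤ k → k < a + b → p k = true →
      (∀ j, a ≤ j → j < k → p j = false) →
      (List.range' a b).find? p = some k := by
  intro b
  induction b with
  | zero => intro a k h1 h2; omega
  | succ b ih =>
    intro a k h1 h2 hk hlt
    rw [List.range'_succ, List.find?_cons]
    by_cases ha : a = k
    · subst ha; simp [hk]
    · have : p a = false := hlt a le_rfl (by omega)
      simp only [this]
      exact ih (a + 1) k (by omega) (by omega) hk (fun j hj hj' => hlt j (by omega) hj')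

theorem longest_seq_spec : Claim_equal_longest_seq := by
  unfold Claim_equal_longest_seq
  intro t _
  unfold Spec_longest_seq
  cases t with
  | nil => rfl
  | cons x xs =>
    have hmax : PySem.List.max? (x :: xs) (fun y => y) = some (xs.foldl max x) :=
      PySem.List.max?_id_cons x xs
    set M := xs.foldl max x with hM
    have hmem : M ∈ x :: xs := PySem.List.max?_mem hmax
    have hismax : ∀ y ∈ x :: xs, y ≤ M := fun y hy => PySem.List.max?_isMax hmax y hy
    obtain ⟨k0, hk0⟩ : ∃ k0, PySem.List.index? (x :: xs) M = some k0 := by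
      have := (PySem.List.index?_isSome_iff (xs := x :: xs) (v := M)).2 hmem
      exact Option.isSome_iff_exists.1 this
    obtain ⟨hk0lt, hk0val, hk0first⟩ := PySem.List.getElem_of_index?_eq_some hk0
    have hfind : (List.range (x :: xs).length).find?
        (fun i => pvInnerA (x :: xs) i (List.range' i ((x :: xs).length - i))) = some k0 := by
      rw [List.range_eq_range']
      apply find?_range'_eq (x :: xs).length 0 k0 (Nat.zero_le _) (by omega)
      · -- the predicate holds at k0
        rw [(pvInnerA_spec_aux (x :: xs) k0 ((x :: xs).length - k0 - 1) k0 hk0lt (by omega))]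
        intro k _ hk2
        rw [List.getD_eq_getElem _ _ hk2, List.getD_eq_getElem _ _ hk0lt, hk0val]
        exact hismax _ (List.getElem_mem hk2)
      · -- the predicate fails strictly before k0
        intro j _ hjk
        have hjlt : j < (x :: xs).length := by omega
        rw [Bool.eq_false_iff]
        intro htrue
        rw [(pvInnerA_spec_aux (x :: xs) j ((x :: xs).length - j - 1) j hjlt (by omega))] at htrue
        have hle : (x :: xs).getD k0 0 ≤ (x :: xs).getD j 0 := htrue k0 (by omega) hk0lt
        rw [List.getD_eq_getElem _ _ hk0lt, List.getD_eq_getElem _ _ hjlt, hk0val] at hle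
        have hne : (x :: xs)[j] ≠ M := hk0first j hjk
        have : (x :: xs)[j] ≤ M := hismax _ (List.getElem_mem hjlt)
        exact hne (le_antisymm this hle)
    simp only [longest_seq, longest_seq_alt, hmax, hk0, Option.bind_some,
      pvOuterA_find, hfind]
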